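-- pv_equiv track=rewrite | github.com/willis-tan/schoolwork | dsc20/homeworks/hw02/hw02.py | context_words
-- ===== SOURCE A (Python) =====
-- def context_words(document, target_word, window_size):
--     """
--     ##############################################################
--     Given a document string, target word, and window size, the function will
--     return a list of tuples.
--
--     Each tuple will follow the form (<target word>, <context word>), where
--     context words are the words surrounding the target word.
--     I.e, if window_size == 1, then the context words are the first word behind
--     and the first word in front of the target word.
--
--     If the target word appears multiple times in the document, then its context
--     words will be found for all occurences.
--     ##############################################################
--
--     Assumptions:
--         `document` is always a string where words are seperated by spaces.
--         `document` string will only have uppercase or lowercase letters,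
--             hyphens (only in compound words), and spaces.
--         `target_word` will always exist in the `document`.
--
--     >>> test_doc = "fifty-two UNITS from lower-division courses " + \
--     "AND sixty UNITS from upper-division courses"
--     >>> context_words(test_doc, "lower-division", 2)
--     [('lower-division', 'units'), ('lower-division', 'from'), \
-- ('lower-division', 'courses'), ('lower-division', 'and')]
--     >>> context_words(test_doc, "upper-division", 2)
--     [('upper-division', 'units'), ('upper-division', 'from'), \
-- ('upper-division', 'courses')]
--     >>> context_words(test_doc, "units", 1)
--     [('units', 'fifty-two'), ('units', 'from'), ('units', 'sixty'), \
-- ('units', 'from')]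
--
--     NEW DOCTESTS
--     >>> test_string = "The FitnessGram Pacer Test is a multistage aerobic \
-- capacity test that progressively gets more difficult as it continues"
--
--     >>> context_words(test_string, "TEST", 2)
--     [('test', 'fitnessgram'), ('test', 'pacer'), ('test', 'is'), \
-- ('test', 'a'), ('test', 'aerobic'), ('test', 'capacity'), ('test', 'that'), \
-- ('test', 'progressively')]
--     >>> context_words(test_string, "the", 2)
--     [('the', 'fitnessgram'), ('the', 'pacer')]
--     >>> context_words(test_string, "continues", 2)
--     [('continues', 'as'), ('continues', 'it')]
--     """
--     # YOUR CODE GOES HERE #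
--     target_word = target_word.lower()
--     lowered = document.lower()
--     words = lowered.split()
--     target_idx = [i for i, word in enumerate(words) if word == target_word]
--
--     output = []
--     for idx in target_idx:
--         for j in range(-min(window_size, idx), 0):
--             output.append((target_word, words[idx + j]))
--         for k in range(min(window_size, len(words) - 1 - idx)):
--             output.append((target_word, words[idx + k + 1]))
--
--     return output
-- ===== SOURCE B (Python) =====
-- def context_words(document, target_word, window_size):
--     """Streaming sliding window: keep a bounded buffer of the last ws words
--     (left context) and a lookahead buffer of the next words (right context),
--     consuming the word stream once; no index list, no index arithmetic."""
--     target = target_word.lower()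
--     words = document.lower().split()
--     ws = max(window_size, 0)
--     prev = []                      # last <= ws consumed words, oldest first
--     buf = words[:ws + 1]           # current word + up to ws lookahead words
--     it = iter(words[ws + 1:])
--     out = []
--     while buf:
--         w = buf.pop(0)
--         if w == target:
--             out.extend((target, c) for c in prev + buf)
--         for nxt in it:             # refill lookahead by one, if any
--             buf.append(nxt)
--             break
--         prev.append(w)
--         if len(prev) > ws:
--             prev.pop(0)
--     return out
-- ===== Notes on version B (the rewrite author's own statement) =====
-- stated objective: alternative
-- what changed: Replaces A's two-phase structure (collect all target indices, then re-derive each context with two clamped range loops and random-access indexing) by a one-pass streaming sliding window that consumes the word stream once, maintaining a bounded buffer of the last window_size words (left context) and a lookahead buffer of the next window_size words (right context), with no index arithmetic at all.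
import Mathlib
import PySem

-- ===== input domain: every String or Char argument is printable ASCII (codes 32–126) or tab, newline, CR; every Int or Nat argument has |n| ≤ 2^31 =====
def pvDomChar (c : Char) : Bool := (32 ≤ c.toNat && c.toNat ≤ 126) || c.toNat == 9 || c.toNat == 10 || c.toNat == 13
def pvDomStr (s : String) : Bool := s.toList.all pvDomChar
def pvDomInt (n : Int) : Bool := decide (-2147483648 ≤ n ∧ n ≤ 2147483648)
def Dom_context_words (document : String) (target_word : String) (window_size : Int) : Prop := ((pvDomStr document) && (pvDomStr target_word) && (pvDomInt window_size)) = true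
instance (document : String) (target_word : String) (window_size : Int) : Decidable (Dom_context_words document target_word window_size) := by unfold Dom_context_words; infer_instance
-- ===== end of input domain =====

-- B replaces A's two-phase structure (index list, then two clamped range loops with
-- index arithmetic) by a one-pass streaming sliding window over the word stream,
-- maintaining a bounded left-context buffer and a lookahead buffer; objective: alternative.

-- ===== PORT A =====
def context_words (document : String) (target_word : String) (window_size : Int) : List (String × String) :=
  let target := PySem.Str.lower target_word
  let lowered := PySem.Str.lower document
  let words := PySem.Str.split₀ lowered
  let target_idx := (PySem.List.enumerate words).filterMap
    (fun p => if p.2 = target then some p.1 else none)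
  target_idx.foldl (fun output idx =>
    (PySem.List.pyRange 0 (min window_size ((words.length : Int) - 1 - idx)) 1).foldl
      (fun o j => o ++ [(target, PySem.List.pyGetD words (idx + j + 1) "")])
      ((PySem.List.pyRange (-(min window_size idx)) 0 1).foldl
        (fun o j => o ++ [(target, PySem.List.pyGetD words (idx + j) "")]) output)) []

-- ===== PORT B =====
-- the `while buf:` loop of Source B: pop the head of the lookahead buffer, emit the
-- context of a match from prev + buf, refill the lookahead by one word from the
-- stream, then push the popped word into prev and trim prev to w words
def goB (t : String) (w : Int) : List String → List String → List String → List (String × String) → List (String × String)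
  | _, [], _, out => out
  | prev, x :: buf', rest, out =>
    let out2 := if x = t then out ++ (prev ++ buf').map (fun c => (t, c)) else out
    let p := prev ++ [x]
    let prev2 := if (p.length : Int) > w then p.tail else p
    match rest with
    | [] => goB t w prev2 buf' [] out2
    | r :: rs => goB t w prev2 (buf' ++ [r]) rs out2
termination_by _ buf rest _ => buf.length + rest.length
decreasing_by all_goals (simp; try omega)

def context_words_alt (document : String) (target_word : String) (window_size : Int) : List (String × String) :=
  let target := PySem.Str.lower target_word
  let words := PySem.Str.split₀ (PySem.Str.lower document)
  let ws := max window_size 0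
  goB target ws [] (PySem.List.slice words none (some (ws + 1)))
    (PySem.List.slice words (some (ws + 1)) none) []

-- ===== PRECONDITION & SPEC =====
def Spec_context_words (document : String) (target_word : String) (window_size : Int) (out : List (String × String)) : Prop := out = context_words_alt document target_word window_size
instance (document : String) (target_word : String) (window_size : Int) (out : List (String × String)) : Decidable (Spec_context_words document target_word window_size out) := by unfold Spec_context_words; infer_instance

-- ===== CLAIM (what is proved, stated in full; the proofs are below) =====
def Claim_equal_context_words : Prop := ∀ (document : String) (target_word : String) (window_size : Int), Dom_context_words document target_word window_size → Spec_context_words document target_word window_size (context_words document target_word window_size)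

-- ===== LEMMAS AND PROOFS =====

lemma map_range_getD_eq_take_drop {α : Type} (xs : List α) (d : α) (a m : Nat)
    (h : a + m ≤ xs.length) :
    (List.range m).map (fun j => xs.getD (a + j) d) = List.take m (List.drop a xs) := by
  apply List.ext_getElem
  · simp; omega
  · intro i h1 h2
    simp only [List.length_map, List.length_range] at h1
    rw [List.getElem_map, List.getElem_range, List.getElem_take, List.getElem_drop,
        List.getD_eq_getElem?_getD, List.getElem?_eq_getElem (by omega)]
    rfl

lemma leftEq (words : List String) (w : Int) (k : Nat) (hk : k < words.length) :
    (PySem.List.pyRange (-(min w (k : Int))) 0 1).map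
      (fun j => PySem.List.pyGetD words ((k : Int) + j) "")
    = (words.take k).drop (k - w.toNat) := by
  rw [List.drop_take]
  by_cases hw0 : w ≤ 0
  · have h1 : min w (k : Int) = w := by omega
    have h2 : w.toNat = 0 := by omega
    rw [h1, PySem.List.pyRange_one_eq_nil (by omega), h2]
    simp
  · push Not at hw0
    have hm : min w.toNat k ≤ k := Nat.min_le_right _ _
    have h1 : min w (k : Int) = ((min w.toNat k : Nat) : Int) := by omega
    rw [h1, PySem.List.pyRange_one]
    have h3 : ((0 : Int) - -((min w.toNat k : Nat) : Int)).toNat = min w.toNat k := by omega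
    rw [h3, List.map_map]
    rw [List.map_congr_left (g := fun j => words.getD ((k - min w.toNat k) + j) "")
        (fun j hj => by
          have : (k : Int) + (-((min w.toNat k : Nat) : Int) + (j : Int))
              = (((k - min w.toNat k) + j : Nat) : Int) := by push_cast; omega
          simp only [Function.comp_apply]
          rw [this, PySem.List.pyGetD_natCast])]
    rw [map_range_getD_eq_take_drop words "" _ _ (by omega)]
    have e1 : k - min w.toNat k = k - w.toNat := by omega
    have e2 : min w.toNat k = k - (k - w.toNat) := by omega
    rw [e1, e2]

lemma rightEq (words : List String) (w : Int) (k : Nat) (hk : k < words.length) :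
    (PySem.List.pyRange 0 (min w ((words.length : Int) - 1 - (k : Int))) 1).map
      (fun j => PySem.List.pyGetD words ((k : Int) + j + 1) "")
    = (words.drop (k + 1)).take w.toNat := by
  have hk' : (k : Int) < (words.length : Int) := by exact_mod_cast hk
  by_cases hw0 : w ≤ 0
  · have h1 : min w ((words.length : Int) - 1 - (k : Int)) = w := by omega
    have h2 : w.toNat = 0 := by omega
    rw [h1, PySem.List.pyRange_one_eq_nil (by omega), h2]
    simp
  · push Not at hw0
    have h1 : min w ((words.length : Int) - 1 - (k : Int))
        = ((min w.toNat (words.length - 1 - k) : Nat) : Int) := by push_cast; omega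
    rw [h1, PySem.List.pyRange_one]
    have h4 : (((min w.toNat (words.length - 1 - k) : Nat) : Int) - 0).toNat
        = min w.toNat (words.length - 1 - k) := by omega
    rw [h4, List.map_map]
    rw [List.map_congr_left (g := fun j => words.getD ((k + 1) + j) "")
        (fun j hj => by
          have : (k : Int) + ((0 : Int) + (j : Int)) + 1 = (((k + 1) + j : Nat) : Int) := by
            push_cast; omega
          simp only [Function.comp_apply]
          rw [this, PySem.List.pyGetD_natCast])]
    rw [map_range_getD_eq_take_drop words "" _ _ (by omega)]
    rcases le_or_gt w.toNat (words.length - 1 - k) with hle | hlt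
    · congr 1
      omega
    · have hr : min w.toNat (words.length - 1 - k) = words.length - 1 - k := by omega
      rw [hr, List.take_of_length_le (by simp; omega), List.take_of_length_le (by simp; omega)]

lemma flatMap_filterMap_ite {α β γ : Type} (c : α → Prop) [DecidablePred c] (v : α → β)
    (g : β → List γ) (l : List α) :
    (l.filterMap (fun x => if c x then some (v x) else none)).flatMap g
    = l.flatMap (fun x => if c x then g (v x) else []) := by
  induction l with
  | nil => rfl
  | cons a l ih => by_cases h : c a <;> simp [h, ih]

lemma flatMap_congr_mem {α β : Type} (l : List α) (f g : α → List β)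
    (h : ∀ x ∈ l, f x = g x) : l.flatMap f = l.flatMap g := by
  induction l with
  | nil => rfl
  | cons a l ih =>
      simp only [List.flatMap_cons]
      rw [h a (by simp), ih (fun x hx => h x (by simp [hx]))]

def pvCtx (t : String) (ws : Nat) (words : List String) : List (String × String) :=
  (List.range words.length).flatMap (fun k =>
    if words.getD k "" = t then
      (((words.take k).drop (k - ws)) ++ ((words.drop (k + 1)).take ws)).map (fun c => (t, c))
    else [])

lemma A_core (t : String) (words : List String) (w : Int) :
    ((PySem.List.enumerate words).filterMap
        (fun p => if p.2 = t then some p.1 else none)).foldl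
      (fun output idx =>
        (PySem.List.pyRange 0 (min w ((words.length : Int) - 1 - idx)) 1).foldl
          (fun o j => o ++ [(t, PySem.List.pyGetD words (idx + j + 1) "")])
          ((PySem.List.pyRange (-(min w idx)) 0 1).foldl
            (fun o j => o ++ [(t, PySem.List.pyGetD words (idx + j) "")]) output)) []
    = pvCtx t w.toNat words := by
  rw [PySem.List.foldl_congr_mem _
        (fun output idx =>
          (PySem.List.pyRange 0 (min w ((words.length : Int) - 1 - idx)) 1).foldl
            (fun o j => o ++ [(t, PySem.List.pyGetD words (idx + j + 1) "")])
            ((PySem.List.pyRange (-(min w idx)) 0 1).foldl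
              (fun o j => o ++ [(t, PySem.List.pyGetD words (idx + j) "")]) output))
        (fun (output : List (String × String)) (idx : Int) =>
          output ++
            ((PySem.List.pyRange (-(min w idx)) 0 1).map
                (fun j => (t, PySem.List.pyGetD words (idx + j) "")) ++
             (PySem.List.pyRange 0 (min w ((words.length : Int) - 1 - idx)) 1).map
                (fun j => (t, PySem.List.pyGetD words (idx + j + 1) ""))))
        []
        (fun acc idx _ => by
          simp only [PySem.List.foldl_append_singleton_eq_map, List.append_assoc]),
      PySem.List.foldl_append_eq_flatMap,
      flatMap_filterMap_ite (fun p : Int × String => p.2 = t)]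
  simp only [List.nil_append]
  rw [PySem.List.enumerate_eq_map_pyRange (d := ""), List.flatMap_map,
      PySem.List.pyRange_one, List.flatMap_map]
  unfold pvCtx
  have hlen : (PySem.List.len words - 0).toNat = words.length := by simp [PySem.List.len]
  rw [hlen]
  apply flatMap_congr_mem
  intro k hk
  have hklt : k < words.length := List.mem_range.mp hk
  simp only [zero_add, PySem.List.pyGetD_natCast]
  by_cases h : words.getD k "" = t
  · rw [if_pos h, if_pos h, ← leftEq words w k hklt, ← rightEq words w k hklt,
        List.map_append, List.map_map, List.map_map]
    rfl
  · rw [if_neg h, if_neg h]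

lemma goB_eq (t : String) (w : Int) (hw : 0 ≤ w) (words : List String)
    (n : Nat) : ∀ (k : Nat) (out : List (String × String)), k + n = words.length →
    goB t w ((words.take k).drop (k - w.toNat)) ((words.drop k).take (w.toNat + 1))
        (words.drop (k + (w.toNat + 1))) out
    = out ++ (List.range' k n).flatMap (fun i =>
        if words.getD i "" = t then
          (((words.take i).drop (i - w.toNat)) ++ ((words.drop (i + 1)).take w.toNat)).map
            (fun c => (t, c))
        else []) := by
  induction n with
  | zero =>
      intro k out hkn
      have h1 : words.drop k = [] := List.drop_eq_nil_of_le (by omega)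
      have h2 : words.drop (k + (w.toNat + 1)) = [] := List.drop_eq_nil_of_le (by omega)
      rw [h1, h2]
      simp [goB]
  | succ n ih =>
      intro k out hkn
      set ws := w.toNat with hws
      have hk : k < words.length := by omega
      -- decompose the lookahead buffer: current word + the right context
      have hdk : words.drop k = words[k] :: words.drop (k + 1) := (List.getElem_cons_drop hk).symm
      have hbuf : (words.drop k).take (ws + 1) = words[k] :: (words.drop (k + 1)).take ws := by
        rw [hdk, List.take_succ_cons]
      -- the new left-context buffer after push + trim
      have hplen : ((words.take k).drop (k - ws)).length = k - (k - ws) := by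
        rw [List.length_drop, List.length_take]; omega
      have hp : (words.take k).drop (k - ws) ++ [words[k]]
          = (words.take (k + 1)).drop (k - ws) := by
        rw [← List.take_append_getElem hk, List.drop_append_of_le_length (by simp; omega)]
      have hprev2 :
          (if ((((words.take k).drop (k - ws) ++ [words[k]]).length : Int) > w) then
              ((words.take k).drop (k - ws) ++ [words[k]]).tail
            else (words.take k).drop (k - ws) ++ [words[k]])
          = (words.take (k + 1)).drop ((k + 1) - ws) := by
        rw [hp]
        have hlen2 : ((words.take (k + 1)).drop (k - ws)).length = (k + 1) - (k - ws) := by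
          rw [List.length_drop, List.length_take]; omega
        by_cases hkw : ws ≤ k
        · rw [if_pos (by rw [hlen2]; omega), List.tail_drop]
          congr 1
          omega
        · rw [if_neg (by rw [hlen2]; omega)]
          congr 1
          omega
      -- the emitted pairs of this step are the body at index k
      have hbody : (if words[k] = t then
            out ++ ((words.take k).drop (k - ws) ++ (words.drop (k + 1)).take ws).map
              (fun c => (t, c))
          else out)
          = out ++ (if words.getD k "" = t then
              (((words.take k).drop (k - ws)) ++ ((words.drop (k + 1)).take ws)).map
                (fun c => (t, c))
            else []) := by
        rw [List.getD_eq_getElem words "" hk]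
        by_cases h : words[k] = t <;> simp [h]
      rw [hbuf]
      by_cases hrest : words.length ≤ k + (ws + 1)
      · -- stream exhausted: the lookahead buffer is the whole remaining suffix
        have hr0 : words.drop (k + (ws + 1)) = [] := List.drop_eq_nil_of_le (by omega)
        have hbuf' : (words.drop (k + 1)).take ws = (words.drop (k + 1)).take (ws + 1) := by
          rw [List.take_of_length_le (by simp; omega), List.take_of_length_le (by simp; omega)]
        have hr1 : words.drop ((k + 1) + (ws + 1)) = [] := List.drop_eq_nil_of_le (by omega)
        rw [hr0, goB, hprev2, hbody, hbuf', ← hr1,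
            ih (k + 1) _ (by omega), List.range'_succ, List.flatMap_cons, List.append_assoc,
            ← hbuf']
      · -- refill the lookahead by one word from the stream
        have hrk : k + ws + 1 < words.length := by omega
        have hr0 : words.drop (k + (ws + 1)) = words[k + ws + 1] :: words.drop ((k + 1) + (ws + 1)) := by
          rw [show (k + 1) + (ws + 1) = (k + ws + 1) + 1 by omega, show k + (ws + 1) = k + ws + 1 by omega]
          exact (List.getElem_cons_drop hrk).symm
        have hbuf2 : (words.drop (k + 1)).take ws ++ [words[k + ws + 1]]
            = (words.drop (k + 1)).take (ws + 1) := by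
          rw [List.take_add_one, List.getElem?_drop,
              show k + 1 + ws = k + ws + 1 by omega, List.getElem?_eq_getElem hrk]
          rfl
        rw [hr0, goB, hprev2, hbody, hbuf2,
            ih (k + 1) _ (by omega), List.range'_succ, List.flatMap_cons, List.append_assoc]

lemma main_core (t : String) (words : List String) (w : Int) :
    ((PySem.List.enumerate words).filterMap
        (fun p => if p.2 = t then some p.1 else none)).foldl
      (fun output idx =>
        (PySem.List.pyRange 0 (min w ((words.length : Int) - 1 - idx)) 1).foldl
          (fun o j => o ++ [(t, PySem.List.pyGetD words (idx + j + 1) "")])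
          ((PySem.List.pyRange (-(min w idx)) 0 1).foldl
            (fun o j => o ++ [(t, PySem.List.pyGetD words (idx + j) "")]) output)) []
    = goB t (max w 0) [] (PySem.List.slice words none (some (max w 0 + 1)))
        (PySem.List.slice words (some (max w 0 + 1)) none) [] := by
  have hW : (0 : Int) ≤ max w 0 := le_max_right _ _
  have hW1 : (0 : Int) ≤ max w 0 + 1 := by omega
  rw [A_core, PySem.List.slice_to words hW1, PySem.List.slice_from words hW1]
  have h1 : (max w 0 + 1).toNat = w.toNat + 1 := by omega
  have h2 : (max w 0).toNat = w.toNat := by omega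
  rw [h1]
  have h := goB_eq t (max w 0) hW words words.length 0 [] (by omega)
  rw [h2] at h
  simp only [List.take_zero, List.drop_nil, List.drop_zero, Nat.zero_sub, zero_add,
    List.nil_append] at h
  rw [h, pvCtx, List.range_eq_range']

-- ===== VERDICT (by name: the statement is the Claim_ definition above) =====
theorem context_words_spec : Claim_equal_context_words := by
  intro document target_word window_size _dom
  unfold Spec_context_words context_words context_words_alt
  exact main_core (PySem.Str.lower target_word)
    (PySem.Str.split₀ (PySem.Str.lower document)) window_size
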